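-- pv_equiv track=rewrite | github.com/cdccnleo/RQA2025 | refactor_large_files.py | extract_class_definitions
-- ===== SOURCE A (Python) =====
-- def extract_class_definitions(content: str):
--     """提取类定义及其范围"""
--     lines = content.split('\n')
--     classes = []
--     in_class = False
--     class_start = 0
--     current_class = ""
--     indent_level = 0
--
--     for i, line in enumerate(lines):
--         stripped = line.strip()
--
--         # 查找类定义开始
--         if stripped.startswith('class '):
--             if in_class:
--                 # 结束之前的类
--                 classes.append((current_class, class_start, i-1))
--
--             current_class = stripped.split('class ')[1].split('(')[0].split(':')[0].strip()
--             class_start = i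
--             in_class = True
--             indent_level = len(line) - len(line.lstrip())
--
--         elif in_class:
--             # 检查是否到达类结束
--             if stripped and not stripped.startswith(' ') and not stripped.startswith('\t') and not stripped.startswith('#'):
--                 current_indent = len(line) - len(line.lstrip())
--                 if current_indent <= indent_level:
--                     classes.append((current_class, class_start, i-1))
--                     in_class = False
--                     current_class = ""
--                     class_start = 0
--
--     # 处理最后一个类
--     if in_class:
--         classes.append((current_class, class_start, len(lines)-1))
--
--     return classes
-- ===== SOURCE B (Python) =====
-- def extract_class_definitions(content: str):
--     """提取类定义及其范围 — two-phase: collect class-start lines, then scan forward per class for its end."""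
--     lines = content.split('\n')
--     n = len(lines)
--     starts = []
--     for i, line in enumerate(lines):
--         stripped = line.strip()
--         if stripped.startswith('class '):
--             name = stripped.split('class ')[1].split('(')[0].split(':')[0].strip()
--             starts.append((i, name, len(line) - len(line.lstrip())))
--     result = []
--     for i, name, level in starts:
--         end = n - 1
--         for j in range(i + 1, n):
--             s = lines[j].strip()
--             if s.startswith('class '):
--                 end = j - 1
--                 break
--             if s and not s.startswith('#') and len(lines[j]) - len(lines[j].lstrip()) <= level:
--                 end = j - 1
--                 break
--         result.append((name, i, end))
--     return result
-- ===== Notes on version B (the rewrite author's own statement) =====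
-- stated objective: alternative
-- what changed: Replaces A's single stateful in_class/indent_level pass with a two-phase scheme: first collect every class-start line (index, name, indent), then scan forward from each start to find its end line (next class line or dedented code line).
import Mathlib
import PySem

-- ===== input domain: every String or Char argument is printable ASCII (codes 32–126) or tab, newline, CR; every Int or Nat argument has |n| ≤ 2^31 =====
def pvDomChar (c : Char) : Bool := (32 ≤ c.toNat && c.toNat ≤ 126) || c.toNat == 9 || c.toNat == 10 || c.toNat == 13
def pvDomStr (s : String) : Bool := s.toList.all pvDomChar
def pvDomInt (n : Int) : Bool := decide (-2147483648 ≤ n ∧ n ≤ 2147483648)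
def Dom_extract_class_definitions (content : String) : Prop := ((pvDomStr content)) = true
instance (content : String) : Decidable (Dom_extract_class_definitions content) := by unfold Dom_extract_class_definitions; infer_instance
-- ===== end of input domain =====

-- B replaces A's single stateful in_class/indent_level pass by collecting the class-start lines first
-- and then scanning forward from each start for its end line (objective: alternative decomposition).

-- ===== PORT A =====
-- name extraction chain `stripped.split('class ')[1].split('(')[0].split(':')[0].strip()`
-- (identical text in Source A and Source B, hence one shared helper)
def pvClassName (stripped : String) : String :=
  PySem.Str.strip (PySem.List.pyGetD
    ((PySem.Str.split? (PySem.List.pyGetD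
      ((PySem.Str.split? (PySem.List.pyGetD
        ((PySem.Str.split? stripped "class ").getD []) 1 "") "(").getD []) 0 "") ":").getD []) 0 "")

-- `len(line) - len(line.lstrip())` (identical text in Source A and Source B)
def pvIndentOf (line : String) : Int := PySem.Str.len line - PySem.Str.len (PySem.Str.lstrip line)

-- the body of A's for-loop; state = (classes, in_class, class_start, current_class, indent_level)
def pvStepA (st : List (String × Int × Int) × Bool × Int × String × Int) (p : Int × String) :
    List (String × Int × Int) × Bool × Int × String × Int :=
  let stripped := PySem.Str.strip p.2
  if PySem.Str.startswith stripped "class " then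
    ((if st.2.1 then st.1 ++ [(st.2.2.2.1, st.2.2.1, p.1 - 1)] else st.1), true, p.1,
      pvClassName stripped, pvIndentOf p.2)
  else if st.2.1 then
    if (stripped != "") && !(PySem.Str.startswith stripped " ")
        && !(PySem.Str.startswith stripped "\t") && !(PySem.Str.startswith stripped "#") then
      if pvIndentOf p.2 ≤ st.2.2.2.2 then
        (st.1 ++ [(st.2.2.2.1, st.2.2.1, p.1 - 1)], false, 0, "", st.2.2.2.2)
      else st
    else st
  else st

def extract_class_definitions (content : String) : List (String × Int × Int) :=
  let lines := (PySem.Str.split? content "\n").getD []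
  let r := (PySem.List.enumerate lines 0).foldl pvStepA ([], false, 0, "", 0)
  if r.2.1 then r.1 ++ [(r.2.2.2.1, r.2.2.1, PySem.List.len lines - 1)] else r.1

-- ===== PORT B =====
-- Source B's inner `for j in range(i+1, n): … break` loop
def pvFindEndB (lines : List String) (level : Int) (dflt : Int) : List Int → Int
  | [] => dflt
  | j :: js =>
    let line := PySem.List.pyGetD lines j ""
    let s := PySem.Str.strip line
    if PySem.Str.startswith s "class " then j - 1
    else if (s != "") && !(PySem.Str.startswith s "#") && decide (pvIndentOf line ≤ level) then j - 1
    else pvFindEndB lines level dflt js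

def extract_class_definitions_alt (content : String) : List (String × Int × Int) :=
  let lines := (PySem.Str.split? content "\n").getD []
  let n := PySem.List.len lines
  let starts := (PySem.List.enumerate lines 0).foldl
    (fun acc p =>
      if PySem.Str.startswith (PySem.Str.strip p.2) "class " then
        acc ++ [(p.1, pvClassName (PySem.Str.strip p.2), pvIndentOf p.2)]
      else acc) []
  starts.foldl
    (fun res t =>
      res ++ [(t.2.1, t.1, pvFindEndB lines t.2.2 (n - 1) (PySem.List.pyRange (t.1 + 1) n 1))]) []

-- ===== PRECONDITION & SPEC =====
def Spec_extract_class_definitions (content : String) (out : List (String × Int × Int)) : Prop := out = extract_class_definitions_alt content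
instance (content : String) (out : List (String × Int × Int)) : Decidable (Spec_extract_class_definitions content out) := by unfold Spec_extract_class_definitions; infer_instance

-- ===== CLAIM (what is proved, stated in full; the proofs are below) =====
def Claim_equal_extract_class_definitions : Prop := ∀ (content : String), Dom_extract_class_definitions content → Spec_extract_class_definitions content (extract_class_definitions content)

-- ===== LEMMAS AND PROOFS =====

-- proof-side abbreviations of the two line tests both programs perform
def pvIsCls (line : String) : Bool := PySem.Str.startswith (PySem.Str.strip line) "class "
def pvDed (lvl : Int) (line : String) : Bool :=
  (PySem.Str.strip line != "") && !(PySem.Str.startswith (PySem.Str.strip line) "#")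
    && decide (pvIndentOf line ≤ lvl)

-- B's behaviour re-expressed over (index, line) pairs
def pvEndB (n lvl : Int) : List (Int × String) → Int
  | [] => n - 1
  | (j, line) :: rest => if pvIsCls line then j - 1 else if pvDed lvl line then j - 1 else pvEndB n lvl rest

def pvRunB (n : Int) : List (Int × String) → List (String × Int × Int)
  | [] => []
  | (i, line) :: rest =>
    if pvIsCls line then
      (pvClassName (PySem.Str.strip line), i, pvEndB n (pvIndentOf line) rest) :: pvRunB n rest
    else pvRunB n rest

def pvFinishA (n : Int) (r : List (String × Int × Int) × Bool × Int × String × Int) :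
    List (String × Int × Int) :=
  if r.2.1 then r.1 ++ [(r.2.2.2.1, r.2.2.1, n - 1)] else r.1

-- a stripped non-empty string starts with no whitespace character
lemma pv_dropWhile_head {p : Char → Bool} : ∀ (l : List Char) (c : Char) (t : List Char),
    l.dropWhile p = c :: t → p c = false := by
  intro l
  induction l with
  | nil => intro c t h; simp [List.dropWhile] at h
  | cons a l ih =>
    intro c t h
    by_cases hp : p a
    · rw [List.dropWhile_cons_of_pos hp] at h; exact ih c t h
    · rw [List.dropWhile_cons_of_neg hp] at h
      cases h; simpa using hp

lemma pv_strip_no_ws (line : String) (h : PySem.Str.strip line ≠ "") :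
    PySem.Str.startswith (PySem.Str.strip line) " " = false ∧
    PySem.Str.startswith (PySem.Str.strip line) "\t" = false := by
  have hl : PySem.Chars.strip line.toList ≠ [] := by
    intro he
    exact h (String.ext (by simpa [PySem.Str.toList_strip] using he))
  cases hm : PySem.Chars.strip line.toList with
  | nil => exact absurd hm hl
  | cons c t =>
    have hpre : PySem.Chars.strip line.toList <+: PySem.Chars.lstrip line.toList := by
      have hsuf := List.dropWhile_suffix (l := (PySem.Chars.lstrip line.toList).reverse)
        (p := PySem.Chars.isspace)
      have h2 := (List.reverse_prefix (l₁ := (PySem.Chars.lstrip line.toList).reverse.dropWhile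
        PySem.Chars.isspace) (l₂ := (PySem.Chars.lstrip line.toList).reverse)).2 hsuf
      simpa [PySem.Chars.strip, PySem.Chars.rstrip] using h2
    rw [hm] at hpre
    obtain ⟨t', ht'⟩ := hpre
    have hc : PySem.Chars.isspace c = false := by
      apply pv_dropWhile_head line.toList c (t ++ t')
      have : PySem.Chars.lstrip line.toList = c :: (t ++ t') := by simpa using ht'.symm
      simpa [PySem.Chars.lstrip] using this
    have hcs : c ≠ ' ' := by intro he; rw [he] at hc; simp [PySem.Chars.isspace] at hc
    have hct : c ≠ '\t' := by intro he; rw [he] at hc; simp [PySem.Chars.isspace] at hc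
    constructor <;>
    · simp only [PySem.Str.startswith_eq, PySem.Str.toList_strip, hm]
      simp [PySem.Chars.startswith, List.isPrefixOf]
      first
      | exact fun he => hcs he.symm
      | exact fun he => hct he.symm

-- A's literal dedent test collapses to pvDed
lemma pv_cond_eq (lvl : Int) (line : String) :
    (((PySem.Str.strip line != "") && !(PySem.Str.startswith (PySem.Str.strip line) " ")
      && !(PySem.Str.startswith (PySem.Str.strip line) "\t")
      && !(PySem.Str.startswith (PySem.Str.strip line) "#"))
      && decide (pvIndentOf line ≤ lvl)) = pvDed lvl line := by
  by_cases h : PySem.Str.strip line = ""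
  · simp [pvDed, h]
  · obtain ⟨h1, h2⟩ := pv_strip_no_ws line h
    simp only [PySem.Str.startswith_eq, PySem.Str.toList_strip] at h1 h2
    have h1' : PySem.Chars.startswith (PySem.Chars.strip line.toList) [' '] = false := h1
    have h2' : PySem.Chars.startswith (PySem.Chars.strip line.toList) ['\t'] = false := h2
    simp [pvDed, h1', h2', Bool.and_assoc]

-- A's step, re-expressed through pvIsCls / pvDed
lemma pvStepA_true (acc : List (String × Int × Int)) (cs : Int) (cc : String) (il i : Int)
    (line : String) :
    pvStepA (acc, true, cs, cc, il) (i, line) =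
      if pvIsCls line then
        (acc ++ [(cc, cs, i - 1)], true, i, pvClassName (PySem.Str.strip line), pvIndentOf line)
      else if pvDed il line then (acc ++ [(cc, cs, i - 1)], false, 0, "", il)
      else (acc, true, cs, cc, il) := by
  simp only [pvStepA, pvIsCls]
  by_cases hc : PySem.Str.startswith (PySem.Str.strip line) "class " = true
  · simp only [hc, if_true]
  · simp only [Bool.not_eq_true] at hc
    simp only [hc, Bool.false_eq_true, if_false]
    have hce := pv_cond_eq il line
    by_cases hd : pvDed il line = true
    · rw [hd] at hce
      have h12 := Bool.and_eq_true_iff.mp hce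
      simp only [h12.1, if_true, hd, if_pos (of_decide_eq_true h12.2)]
    · simp only [Bool.not_eq_true] at hd
      rw [hd] at hce
      simp only [hd, Bool.false_eq_true, if_false]
      by_cases h1 : (PySem.Str.strip line != "" && !(PySem.Str.startswith (PySem.Str.strip line) " ")
          && !(PySem.Str.startswith (PySem.Str.strip line) "\t")
          && !(PySem.Str.startswith (PySem.Str.strip line) "#")) = true
      · rw [h1, Bool.true_and] at hce
        simp only [h1, if_true, if_neg (of_decide_eq_false hce)]
      · simp only [Bool.not_eq_true] at h1
        simp only [h1, Bool.false_eq_true, if_false]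
        simp

lemma pvStepA_false (acc : List (String × Int × Int)) (cs : Int) (cc : String) (il i : Int)
    (line : String) :
    pvStepA (acc, false, cs, cc, il) (i, line) =
      if pvIsCls line then
        (acc, true, i, pvClassName (PySem.Str.strip line), pvIndentOf line)
      else (acc, false, cs, cc, il) := by
  simp only [pvStepA, pvIsCls]
  by_cases hc : PySem.Str.startswith (PySem.Str.strip line) "class " = true
  · simp only [hc, if_true, Bool.false_eq_true, if_false]
  · simp only [Bool.not_eq_true] at hc
    simp only [hc, Bool.false_eq_true, if_false]

-- master invariant: A's fold, finished, is B's per-start description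
lemma pvMaster (n : Int) : ∀ (ps : List (Int × String)) (acc : List (String × Int × Int))
    (b : Bool) (cs : Int) (cc : String) (il : Int),
    pvFinishA n (ps.foldl pvStepA (acc, b, cs, cc, il)) =
      acc ++ (if b then [(cc, cs, pvEndB n il ps)] else []) ++ pvRunB n ps := by
  intro ps
  induction ps with
  | nil =>
    intro acc b cs cc il
    cases b <;> simp [pvFinishA, pvEndB, pvRunB]
  | cons p rest ih =>
    intro acc b cs cc il
    obtain ⟨i, line⟩ := p
    rw [List.foldl_cons]
    cases b with
    | true =>
      rw [pvStepA_true]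
      by_cases hc : pvIsCls line = true
      · rw [if_pos hc, ih]
        simp [pvEndB, pvRunB, hc]
      · simp only [Bool.not_eq_true] at hc
        simp only [hc, Bool.false_eq_true, if_false]
        by_cases hd : pvDed il line = true
        · rw [if_pos hd, ih]
          simp [pvEndB, pvRunB, hc, hd]
        · simp only [Bool.not_eq_true] at hd
          simp only [hd, Bool.false_eq_true, if_false]
          rw [ih]
          simp [pvEndB, pvRunB, hc, hd]
    | false =>
      rw [pvStepA_false]
      by_cases hc : pvIsCls line = true
      · rw [if_pos hc, ih]
        simp [pvRunB, hc]
      · simp only [Bool.not_eq_true] at hc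
        simp only [hc, Bool.false_eq_true, if_false]
        rw [ih]
        simp [pvRunB, hc]

-- B's index loop over range(i+1, n) equals pvEndB on the corresponding enumerate suffix
lemma pv_end_bridge (lines : List String) : ∀ (suf pre : List String), pre ++ suf = lines → ∀ lvl,
    pvFindEndB lines lvl ((lines.length : Int) - 1)
        (PySem.List.pyRange (pre.length : Int) (lines.length : Int) 1)
      = pvEndB (lines.length : Int) lvl (PySem.List.enumerate suf (pre.length : Int)) := by
  intro suf
  induction suf with
  | nil =>
    intro pre h lvl
    have hlen : pre.length = lines.length := by rw [← h]; simp
    have hnil : PySem.List.pyRange (pre.length : Int) (lines.length : Int) 1 = [] :=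
      PySem.List.pyRange_one_eq_nil (by exact_mod_cast hlen.ge)
    rw [hnil]
    simp [PySem.List.enumerate_nil, pvEndB, pvFindEndB]
  | cons x rest ih =>
    intro pre h lvl
    have hlt : (pre.length : Int) < (lines.length : Int) := by
      rw [← h]; simp only [List.length_append, List.length_cons]; push_cast; omega
    rw [PySem.List.pyRange_one_cons hlt, PySem.List.enumerate_cons]
    have hx : PySem.List.pyGetD lines ((pre.length : Nat) : Int) "" = x := by
      rw [PySem.List.pyGetD_natCast, ← h]
      simp [List.getD]
    simp only [pvFindEndB, pvEndB, hx]
    by_cases hc : pvIsCls x = true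
    · have hc' := hc; simp only [pvIsCls] at hc'
      simp only [hc, hc', if_true]
    · simp only [Bool.not_eq_true] at hc
      have hc' := hc; simp only [pvIsCls] at hc'
      simp only [hc, hc', Bool.false_eq_true, if_false]
      by_cases hd : pvDed lvl x = true
      · have hd' := hd; simp only [pvDed] at hd'
        simp only [hd, hd', if_true]
      · simp only [Bool.not_eq_true] at hd
        have hd' := hd; simp only [pvDed] at hd'
        simp only [hd, hd', Bool.false_eq_true, if_false]
        have h' : (pre ++ [x]) ++ rest = lines := by simpa using h
        have := ih (pre ++ [x]) h' lvl
        simpa [List.length_append] using this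

lemma pv_runB_bridge (lines : List String) : ∀ (suf pre : List String), pre ++ suf = lines →
    ((PySem.List.enumerate suf (pre.length : Int)).filter (fun p => pvIsCls p.2)).map
      (fun p => (pvClassName (PySem.Str.strip p.2), p.1,
        pvFindEndB lines (pvIndentOf p.2) ((lines.length : Int) - 1)
          (PySem.List.pyRange (p.1 + 1) (lines.length : Int) 1)))
      = pvRunB (lines.length : Int) (PySem.List.enumerate suf (pre.length : Int)) := by
  intro suf
  induction suf with
  | nil => intro pre h; simp [PySem.List.enumerate_nil, pvRunB]
  | cons x rest ih =>
    intro pre h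
    have h' : (pre ++ [x]) ++ rest = lines := by simpa using h
    have ih' := ih (pre ++ [x]) h'
    rw [PySem.List.enumerate_cons]
    by_cases hc : pvIsCls x = true
    · simp only [List.filter_cons, hc, if_true, List.map_cons, pvRunB]
      have hend := pv_end_bridge lines rest (pre ++ [x]) h' (pvIndentOf x)
      simp only [List.length_append, List.length_singleton] at hend ih'
      push_cast at hend ih'
      rw [hend, ih']
    · simp only [Bool.not_eq_true] at hc
      simp only [List.filter_cons, hc, Bool.false_eq_true, if_false, pvRunB]
      simpa [List.length_append] using ih'

-- ===== VERDICT (by name: the statement is the Claim_ definition above) =====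
theorem extract_class_definitions_spec : Claim_equal_extract_class_definitions := by
  intro content _
  unfold Spec_extract_class_definitions
  simp only [extract_class_definitions, extract_class_definitions_alt]
  have hA := pvMaster (PySem.List.len ((PySem.Str.split? content "\n").getD []))
      (PySem.List.enumerate ((PySem.Str.split? content "\n").getD []) 0) [] false 0 "" 0
  simp only [pvFinishA] at hA
  rw [hA]
  rw [PySem.List.foldl_append_if
      (fun q : Int × String => PySem.Str.startswith (PySem.Str.strip q.2) "class ")
      (fun q : Int × String => (q.1, pvClassName (PySem.Str.strip q.2), pvIndentOf q.2))]
  rw [PySem.List.foldl_append_singleton_eq_map]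
  simp only [List.nil_append, Bool.false_eq_true, if_false, List.map_map]
  have hB := pv_runB_bridge ((PySem.Str.split? content "\n").getD [])
      ((PySem.Str.split? content "\n").getD []) [] rfl
  simp only [List.length_nil, Nat.cast_zero] at hB
  simp only [PySem.List.len_eq]
  rw [← hB]
  rfl
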